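-- pv_equiv track=rewrite | github.com/attakei-lab/googlefonts-markup | googlefonts_markup/models.py | build_css_tag
-- ===== SOURCE A (Python) =====
-- def build_css_tag(url: str, defer: bool) -> str:
--     """
--     Make ``link`` element from URL and donload-rule.
--
--     :param url: Target URL
--     :param defer: Flag to donload defer
--     """
--     attrs = {
--         "href": url,
--         "rel": "stylesheet",
--     }
--     if defer:
--         attrs["rel"] = "preload"
--         attrs["as"] = "style"
--         attrs["onload"] = "this.onload=null;this.rel='stylesheet'"
--     attr_text = " ".join(f'{k}="{v}"' for k, v in attrs.items())
--     return f"<link {attr_text}>"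
-- ===== SOURCE B (Python) =====
-- def build_css_tag(url: str, defer: bool) -> str:
--     if defer:
--         return (f'<link href="{url}" rel="preload" as="style" '
--                 'onload="this.onload=null;this.rel=\'stylesheet\'">')
--     return f'<link href="{url}" rel="stylesheet">'
-- ===== Notes on version B (the rewrite author's own statement) =====
-- stated objective: simpler
-- what changed: Drops the attrs dict and the join-over-items loop; B branches on defer and returns one literal f-string per case.
import Mathlib
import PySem

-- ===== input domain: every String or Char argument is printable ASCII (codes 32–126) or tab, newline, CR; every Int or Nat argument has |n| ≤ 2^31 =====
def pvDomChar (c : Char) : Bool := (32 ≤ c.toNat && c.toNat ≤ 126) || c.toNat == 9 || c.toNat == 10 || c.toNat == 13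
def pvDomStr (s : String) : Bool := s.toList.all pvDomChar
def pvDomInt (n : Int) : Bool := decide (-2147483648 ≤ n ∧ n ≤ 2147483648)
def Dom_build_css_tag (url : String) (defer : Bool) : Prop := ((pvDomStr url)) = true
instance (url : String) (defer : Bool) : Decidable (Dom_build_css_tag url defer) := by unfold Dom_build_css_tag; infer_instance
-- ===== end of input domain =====

-- B drops A's attrs dict and join-over-items loop, returning one literal per defer branch (objective: simpler).

-- ===== PORT A =====
def build_css_tag (url : String) (defer : Bool) : String :=
  let attrs : PySem.Dict String String :=
    (PySem.Dict.empty.insert "href" url).insert "rel" "stylesheet"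
  let attrs :=
    if defer then
      ((attrs.insert "rel" "preload").insert "as" "style").insert
        "onload" "this.onload=null;this.rel='stylesheet'"
    else attrs
  let attr_text :=
    PySem.Str.join " " (attrs.items.map (fun kv => kv.1 ++ "=\"" ++ kv.2 ++ "\""))
  "<link " ++ attr_text ++ ">"

-- ===== PORT B =====
def build_css_tag_alt (url : String) (defer : Bool) : String :=
  if defer then
    "<link href=\"" ++ url ++ "\" rel=\"preload\" as=\"style\" onload=\"this.onload=null;this.rel='stylesheet'\">"
  else
    "<link href=\"" ++ url ++ "\" rel=\"stylesheet\">"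

-- ===== PRECONDITION & SPEC =====
def Spec_build_css_tag (url : String) (defer : Bool) (out : String) : Prop := out = build_css_tag_alt url defer
instance (url : String) (defer : Bool) (out : String) : Decidable (Spec_build_css_tag url defer out) := by unfold Spec_build_css_tag; infer_instance

-- ===== CLAIM (what is proved, stated in full; the proofs are below) =====
def Claim_equal_build_css_tag : Prop := ∀ (url : String) (defer : Bool), Dom_build_css_tag url defer → Spec_build_css_tag url defer (build_css_tag url defer)

-- ===== LEMMAS AND PROOFS =====
theorem build_css_tag_eq (url : String) (defer : Bool) :
    build_css_tag url defer = build_css_tag_alt url defer := by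
  cases defer <;>
    simp [build_css_tag, build_css_tag_alt, PySem.Dict.insert, PySem.Dict.empty,
      PySem.Str.join, PySem.Chars.join, List.intercalate, List.intersperse,
      ← String.toList_inj]

-- ===== VERDICT (by name: the statement is the Claim_ definition above) =====
theorem build_css_tag_spec : Claim_equal_build_css_tag := by
  intro url defer _
  exact build_css_tag_eq url defer
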